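-- pv_equiv track=rewrite | github.com/h28a3/AtCoder | 25-8-9/src/d.py | count_even_zero_substrings
-- ===== SOURCE A (Python) =====
-- def count_even_zero_substrings(S: str) -> int:
--     prefix = [0]  # prefix parity of zeros
--     for ch in S:
--         prefix.append(prefix[-1] ^ (1 if ch == '0' else 0))
--
--     count = [0, 0]
--     for p in prefix:
--         count[p] += 1
--
--     # 同じprefixの組み合わせの数を合計
--     ans = count[0] * (count[0] - 1) // 2 + count[1] * (count[1] - 1) // 2
--     return ans
-- ===== SOURCE B (Python) =====
-- def count_even_zero_substrings(S: str) -> int: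
--     # One incremental pass: count pairs of equal-parity prefixes as they appear,
--     # instead of storing the prefix list and applying a closed-form binomial.
--     parity = 0
--     seen = [1, 0]  # prefixes seen so far with parity 0 / 1 (empty prefix counted)
--     ans = 0
--     for ch in S:
--         parity ^= 1 if ch == '0' else 0
--         ans += seen[parity]
--         seen[parity] += 1
--     return ans
-- ===== Notes on version B (the rewrite author's own statement) =====
-- stated objective: alternative
-- what changed: Replaces A's stored prefix-parity list, second bucket-counting loop and closed-form n*(n-1)//2 combination with a single incremental pass that keeps only a parity bit and two counters, adding seen[parity] to the answer as each prefix arrives.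
import Mathlib
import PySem

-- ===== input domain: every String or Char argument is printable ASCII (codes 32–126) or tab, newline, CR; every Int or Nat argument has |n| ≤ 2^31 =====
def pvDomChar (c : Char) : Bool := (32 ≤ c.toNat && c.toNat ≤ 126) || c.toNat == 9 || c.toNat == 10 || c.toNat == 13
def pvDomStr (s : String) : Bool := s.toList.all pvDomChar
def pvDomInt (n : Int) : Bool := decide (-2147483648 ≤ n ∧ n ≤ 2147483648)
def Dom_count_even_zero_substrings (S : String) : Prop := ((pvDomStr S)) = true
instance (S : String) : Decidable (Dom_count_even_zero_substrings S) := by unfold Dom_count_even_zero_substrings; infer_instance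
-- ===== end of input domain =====

-- B replaces A's stored prefix-parity list, second counting loop and closed-form
-- binomial by a single incremental pass with a parity bit and two counters (alternative decomposition).

-- ===== PORT A =====
-- prefix.append(prefix[-1] ^ (1 if ch == '0' else 0)); prefix values are 0/1,
-- kept as Nat; prefix[-1] is ported as getLastD 0 (the list is never empty).
def pvStepA (pr : List Nat) (ch : Char) : List Nat :=
  pr ++ [(pr.getLastD 0) ^^^ (if ch = '0' then 1 else 0)]

-- count[p] += 1 over the two buckets count[0], count[1], kept as a pair
def pvCountStep (c : Nat × Nat) (p : Nat) : Nat × Nat :=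
  if p = 0 then (c.1 + 1, c.2) else (c.1, c.2 + 1)

def count_even_zero_substrings (S : String) : Int :=
  let pfx := S.toList.foldl pvStepA [0]
  let count := pfx.foldl pvCountStep (0, 0)
  PySem.Int.floordiv ((count.1 : Int) * ((count.1 : Int) - 1)) 2
    + PySem.Int.floordiv ((count.2 : Int) * ((count.2 : Int) - 1)) 2

-- ===== PORT B =====
-- state = (parity, seen[0], seen[1], ans)
def pvStepB (st : Nat × Nat × Nat × Int) (ch : Char) : Nat × Nat × Nat × Int :=
  let p := st.1 ^^^ (if ch = '0' then 1 else 0)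
  (p, (if p = 0 then st.2.1 + 1 else st.2.1),
      (if p = 0 then st.2.2.1 else st.2.2.1 + 1),
      st.2.2.2 + (if p = 0 then (st.2.1 : Int) else (st.2.2.1 : Int)))

def count_even_zero_substrings_alt (S : String) : Int :=
  (S.toList.foldl pvStepB (0, 1, 0, 0)).2.2.2

-- ===== PRECONDITION & SPEC =====
def Spec_count_even_zero_substrings (S : String) (out : Int) : Prop := out = count_even_zero_substrings_alt S
instance (S : String) (out : Int) : Decidable (Spec_count_even_zero_substrings S out) := by unfold Spec_count_even_zero_substrings; infer_instance

-- ===== CLAIM (what is proved, stated in full; the proofs are below) =====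
def Claim_equal_count_even_zero_substrings : Prop := ∀ (S : String), Dom_count_even_zero_substrings S → Spec_count_even_zero_substrings S (count_even_zero_substrings S)

-- ===== LEMMAS AND PROOFS =====

-- n choose 2, as the Int value A's floor division produces
def pvTri (n : Nat) : Int := ((n * (n - 1) / 2 : Nat) : Int)

theorem pvTri_succ (s : Nat) : pvTri (s + 1) = pvTri s + (s : Int) := by
  unfold pvTri
  have h : (s + 1) * s / 2 = s * (s - 1) / 2 + s := by
    cases s with
    | zero => simp
    | succ k =>
      obtain ⟨m, hm⟩ := Nat.even_mul_succ_self (k + 1)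
      obtain ⟨j, hj⟩ := Nat.even_mul_succ_self k
      have h1 : (k + 1 + 1) * (k + 1) = 2 * m := by
        calc (k + 1 + 1) * (k + 1) = (k + 1) * (k + 1 + 1) := by ring
          _ = 2 * m := by omega
      have h2 : (k + 1) * (k + 1 - 1) = 2 * j := by
        have : (k + 1) * k = 2 * j := by
          calc (k + 1) * k = k * (k + 1) := by ring
            _ = 2 * j := by omega
        simpa using this
      have h3 : 2 * m = 2 * j + 2 * (k + 1) := by
        calc 2 * m = (k + 1 + 1) * (k + 1) := h1.symm
          _ = (k + 1) * k + 2 * (k + 1) := by ring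
          _ = 2 * j + 2 * (k + 1) := by
              have : (k + 1) * k = 2 * j := by simpa using h2
              omega
      rw [h1, h2]
      omega
  have := congrArg (fun n : Nat => (n : Int)) h
  push_cast at this ⊢
  simpa using this

theorem pvFloordiv_tri (n : Nat) :
    PySem.Int.floordiv ((n : Int) * ((n : Int) - 1)) 2 = pvTri n := by
  cases n with
  | zero => decide
  | succ k =>
    have h : ((k + 1 : Nat) : Int) * (((k + 1 : Nat) : Int) - 1) = (((k + 1) * k : Nat) : Int) := by
      push_cast; ring
    rw [h]
    unfold pvTri
    simp only [Nat.add_sub_cancel]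
    exact_mod_cast PySem.Int.floordiv_natCast ((k + 1) * k) 2

theorem pvCountFold (pr : List Nat) : ∀ (a b : Nat),
    pr.foldl pvCountStep (a, b)
      = (a + pr.countP (· == 0), b + pr.countP (· != 0)) := by
  induction pr with
  | nil => intro a b; simp
  | cons p t ih =>
    intro a b
    simp only [List.foldl_cons, List.countP_cons]
    by_cases hp : p = 0
    · simp [pvCountStep, hp, ih]
      omega
    · have h0 : (p == 0) = false := by simpa using hp
      simp [pvCountStep, hp, ih, h0]
      omega

-- the full B-state reached from any nonempty prefix list equals the state A's data describes
theorem pvMain (l : List Char) : ∀ (pr : List Nat), pr ≠ [] →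
    l.foldl pvStepB (pr.getLastD 0, pr.countP (· == 0), pr.countP (· != 0),
        pvTri (pr.countP (· == 0)) + pvTri (pr.countP (· != 0)))
      = ((l.foldl pvStepA pr).getLastD 0,
         (l.foldl pvStepA pr).countP (· == 0),
         (l.foldl pvStepA pr).countP (· != 0),
         pvTri ((l.foldl pvStepA pr).countP (· == 0))
           + pvTri ((l.foldl pvStepA pr).countP (· != 0))) := by
  induction l with
  | nil => intro pr _; simp
  | cons ch t ih =>
    intro pr hpr
    have hx : (pr ++ [pr.getLastD 0 ^^^ (if ch = '0' then 1 else 0)]) ≠ [] := by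
      simp
    have hstep : List.foldl pvStepA pr (ch :: t) = List.foldl pvStepA (pvStepA pr ch) t := by
      simp
    set x := pr.getLastD 0 ^^^ (if ch = '0' then 1 else 0) with hxdef
    have hlast : (pr ++ [x]).getLastD 0 = x := by
      simp
    have hc0 : (pr ++ [x]).countP (· == 0) = pr.countP (· == 0) + (if x = 0 then 1 else 0) := by
      by_cases h : x = 0 <;> simp [List.countP_append, h]
    have hc1 : (pr ++ [x]).countP (· != 0) = pr.countP (· != 0) + (if x = 0 then 0 else 1) := by
      by_cases h : x = 0 <;> simp [List.countP_append, h]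
    have hB : pvStepB (pr.getLastD 0, pr.countP (· == 0), pr.countP (· != 0),
        pvTri (pr.countP (· == 0)) + pvTri (pr.countP (· != 0))) ch
      = ((pr ++ [x]).getLastD 0, (pr ++ [x]).countP (· == 0), (pr ++ [x]).countP (· != 0),
         pvTri ((pr ++ [x]).countP (· == 0)) + pvTri ((pr ++ [x]).countP (· != 0))) := by
      rw [hlast, hc0, hc1]
      unfold pvStepB
      by_cases h : x = 0
      · simp only [← hxdef, h, if_pos]
        simp [pvTri_succ]
        ring
      · simp only [← hxdef, if_neg h]
        simp [pvTri_succ]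
        ring
    calc List.foldl pvStepB _ (ch :: t)
        = List.foldl pvStepB (pvStepB (pr.getLastD 0, pr.countP (· == 0), pr.countP (· != 0),
            pvTri (pr.countP (· == 0)) + pvTri (pr.countP (· != 0))) ch) t := by simp
      _ = _ := by
          rw [hB, ih (pr ++ [x]) hx, List.foldl_cons,
            show pvStepA pr ch = pr ++ [x] from rfl]

-- ===== VERDICT (by name: the statement is the Claim_ definition above) =====
theorem count_even_zero_substrings_spec : Claim_equal_count_even_zero_substrings := by
  intro S _
  unfold Spec_count_even_zero_substrings count_even_zero_substrings count_even_zero_substrings_alt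
  have hmain := pvMain S.toList [0] (by simp)
  simp only [show ([0] : List Nat).getLastD 0 = 0 from rfl,
    show List.countP (· == 0) ([0] : List Nat) = 1 from rfl,
    show List.countP (· != 0) ([0] : List Nat) = 0 from rfl,
    show pvTri 1 + pvTri 0 = 0 from by decide] at hmain
  rw [hmain]
  dsimp only
  rw [pvCountFold]
  simp only [Nat.zero_add]
  rw [pvFloordiv_tri, pvFloordiv_tri]
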